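-- pv_equiv track=rewrite | github.com/Potalej/gravidade-python | auxiliares/auxiliares.py | tensor_inercia_geral
-- ===== SOURCE A (Python) =====
-- def tensor_inercia (ma, Ra):
--   r1, r2, r3 = Ra
--   I = [
--     [ri*ma for ri in [-(r2**2 + r3**2), r1*r2, r1*r3]],
--     [ri*ma for ri in [r1*r2, -(r1**2 + r3**2), r2*r3]],
--     [ri*ma for ri in [r1*r3, r2*r3, -(r1**2 + r2**2)]],
--   ]
--   return I
--
-- def tensor_inercia_geral (m, R):
--   I = [[0 for i in range(3)] for j in range(3)]
--   for a in range(len(m)):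
--     Ia = tensor_inercia(m[a], R[a])
--     for i in range(3):
--       for j in range(3):
--         I[i][j] += Ia[i][j]
--   return I
-- ===== SOURCE B (Python) =====
-- def moment(m, R, i, j):
--     # (i,j) second moment of mass: sum of ma * Ra[i] * Ra[j]
--     s = 0
--     for ma, Ra in zip(m, R):
--         s += ma * Ra[i] * Ra[j]
--     return s
--
-- def tensor_inercia_geral(m, R):
--     # second-moment matrix S, then I = S - tr(S)*Id on the diagonal
--     S = [[moment(m, R, i, j) for j in range(3)] for i in range(3)]
--     tr = S[0][0] + S[1][1] + S[2][2]
--     return [[S[i][j] - tr if i == j else S[i][j] for j in range(3)] for i in range(3)]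
-- ===== Notes on version B (the rewrite author's own statement) =====
-- stated objective: alternative
-- what changed: B drops the per-particle inertia-tensor helper and its accumulation entirely: it computes the second-moment matrix S[i][j] = sum of ma*Ra[i]*Ra[j] by nine independent staged sums over zip(m,R) and obtains the inertia tensor from the identity I = S - tr(S)*Id on the diagonal (off-diagonals are S itself).
import Mathlib
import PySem

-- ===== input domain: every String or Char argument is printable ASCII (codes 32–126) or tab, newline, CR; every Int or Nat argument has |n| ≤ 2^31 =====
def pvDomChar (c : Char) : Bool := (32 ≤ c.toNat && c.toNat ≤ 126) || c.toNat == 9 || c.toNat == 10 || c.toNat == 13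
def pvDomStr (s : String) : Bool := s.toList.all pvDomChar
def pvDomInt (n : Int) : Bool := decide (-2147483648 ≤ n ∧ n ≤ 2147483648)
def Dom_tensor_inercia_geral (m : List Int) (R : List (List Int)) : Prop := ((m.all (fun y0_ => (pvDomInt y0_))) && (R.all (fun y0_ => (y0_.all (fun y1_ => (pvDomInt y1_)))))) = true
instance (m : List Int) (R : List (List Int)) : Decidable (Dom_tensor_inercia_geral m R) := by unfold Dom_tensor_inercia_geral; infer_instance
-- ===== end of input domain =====

-- B replaces A's per-particle inertia tensors and their accumulation by the second-moment
-- matrix S[i][j] = Σ ma·Ra[i]·Ra[j] (nine staged sums) and the identity I = S − tr(S)·Id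
-- on the diagonal ('alternative'; exact over the integer inputs of Dom).

-- ===== PORT A =====
-- per-particle inertia tensor; Python unpacks 'r1, r2, r3 = Ra' and raises ValueError
-- unless Ra has exactly 3 elements — that case is excluded by Pre_ (default [] here).
def tensor_inercia (ma : Int) (Ra : List Int) : List (List Int) :=
  match Ra with
  | [r1, r2, r3] =>
    [ [(-(r2^2 + r3^2))*ma, (r1*r2)*ma, (r1*r3)*ma],
      [(r1*r2)*ma, (-(r1^2 + r3^2))*ma, (r2*r3)*ma],
      [(r1*r3)*ma, (r2*r3)*ma, (-(r1^2 + r2^2))*ma] ]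
  | _ => []

-- the nested 'for i / for j: I[i][j] += Ia[i][j]' over two 3×3 matrices, elementwise
def stepA (m : List Int) (R : List (List Int)) (I : List (List Int)) (a : Int) : List (List Int) :=
  List.zipWith (List.zipWith (· + ·)) I
    (tensor_inercia (PySem.List.pyGetD m a 0) (PySem.List.pyGetD R a []))

def tensor_inercia_geral (m : List Int) (R : List (List Int)) : List (List Int) :=
  (PySem.List.pyRange 0 (PySem.List.len m) 1).foldl (stepA m R)
    ((PySem.List.pyRange 0 3 1).map (fun _ => (PySem.List.pyRange 0 3 1).map (fun _ => (0 : Int))))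

-- ===== PORT B =====
-- 's += ma*Ra[i]*Ra[j]' over zip(m,R); Python's Ra[i] raises on a too-short row — those
-- inputs are outside Pre_, so the 0 default never matters there.
def moment (m : List Int) (R : List (List Int)) (i j : Int) : Int :=
  (m.zip R).foldl
    (fun s pr => s + pr.1 * PySem.List.pyGetD pr.2 i 0 * PySem.List.pyGetD pr.2 j 0) 0

def tensor_inercia_geral_alt (m : List Int) (R : List (List Int)) : List (List Int) :=
  let S := (PySem.List.pyRange 0 3 1).map
    (fun i => (PySem.List.pyRange 0 3 1).map (fun j => moment m R i j))
  let tr := PySem.List.pyGetD (PySem.List.pyGetD S 0 []) 0 0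
          + PySem.List.pyGetD (PySem.List.pyGetD S 1 []) 1 0
          + PySem.List.pyGetD (PySem.List.pyGetD S 2 []) 2 0
  (PySem.List.pyRange 0 3 1).map (fun i => (PySem.List.pyRange 0 3 1).map (fun j =>
    if i == j then PySem.List.pyGetD (PySem.List.pyGetD S i []) j 0 - tr
    else PySem.List.pyGetD (PySem.List.pyGetD S i []) j 0))

-- ===== PRECONDITION & SPEC =====
-- Pre_ excludes exactly the inputs where A raises: R shorter than m (IndexError at R[a])
-- or a row among the first len(m) rows of R that is not a 3-element list (ValueError).
def Pre_tensor_inercia_geral (m : List Int) (R : List (List Int)) : Prop :=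
  m.length ≤ R.length ∧ ∀ row ∈ R.take m.length, row.length = 3
instance (m : List Int) (R : List (List Int)) : Decidable (Pre_tensor_inercia_geral m R) := by unfold Pre_tensor_inercia_geral; infer_instance

def pvWitness_tensor_inercia_geral : List Int × List (List Int) :=
  ([2, 3], [[1, 0, -1], [0, 2, 1]])

def Spec_tensor_inercia_geral (m : List Int) (R : List (List Int)) (out : List (List Int)) : Prop := out = tensor_inercia_geral_alt m R
instance (m : List Int) (R : List (List Int)) (out : List (List Int)) : Decidable (Spec_tensor_inercia_geral m R out) := by unfold Spec_tensor_inercia_geral; infer_instance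

-- ===== CLAIM (what is proved, stated in full; the proofs are below) =====
def Claim_equal_tensor_inercia_geral : Prop := ∀ (m : List Int) (R : List (List Int)), Dom_tensor_inercia_geral m R → Pre_tensor_inercia_geral m R → Spec_tensor_inercia_geral m R (tensor_inercia_geral m R)

-- ===== LEMMAS AND PROOFS =====

def mat6 (x y z p q r : Int) : List (List Int) := [[x, p, q], [p, y, r], [q, r, z]]

-- the six scalar sums hidden in A's accumulation, as a fold over (mass, row) pairs
def stepB (acc : Int × Int × Int × Int × Int × Int) (pr : Int × List Int) :
    Int × Int × Int × Int × Int × Int :=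
  match pr with
  | (ma, [r1, r2, r3]) =>
    (acc.1 + (-(r2^2 + r3^2))*ma, acc.2.1 + (-(r1^2 + r3^2))*ma, acc.2.2.1 + (-(r1^2 + r2^2))*ma,
     acc.2.2.2.1 + (r1*r2)*ma, acc.2.2.2.2.1 + (r1*r3)*ma, acc.2.2.2.2.2 + (r2*r3)*ma)
  | _ => acc

-- A's index loop from position a onward equals a fold over the zip of the dropped suffixes.
lemma foldA_drop (k : Nat) : ∀ (a : Nat) (m : List Int) (R : List (List Int))
    (init : List (List Int)), m.length - a = k → a ≤ m.length → m.length ≤ R.length →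
    (PySem.List.pyRange (a : Int) (PySem.List.len m) 1).foldl (stepA m R) init
      = ((m.drop a).zip (R.drop a)).foldl
          (fun I pr => List.zipWith (List.zipWith (· + ·)) I (tensor_inercia pr.1 pr.2)) init := by
  induction k with
  | zero =>
    intro a m R init hk ha hmr
    have ha' : a = m.length := by omega
    subst ha'
    rw [PySem.List.pyRange_one_eq_nil (by simp [PySem.List.len])]
    simp
  | succ k ih =>
    intro a m R init hk ha hmr
    have halt : a < m.length := by omega
    have haR : a < R.length := by omega
    rw [PySem.List.pyRange_one_cons (by simp [PySem.List.len]; omega)]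
    rw [List.drop_eq_getElem_cons halt, List.drop_eq_getElem_cons haR]
    simp only [List.zip_cons_cons, List.foldl_cons]
    have h1 : (a : Int) + 1 = ((a + 1 : Nat) : Int) := by push_cast; ring
    rw [h1, ih (a + 1) m R _ (by omega) (by omega) hmr]
    congr 1
    simp [stepA, PySem.List.pyGetD_natCast, List.getD_eq_getElem?_getD, halt, haR]

-- one zip-fold step on a symmetric matrix = one stepB on the six scalars
lemma zip_fold_eq : ∀ (l : List (Int × List Int)), (∀ pr ∈ l, pr.2.length = 3) →
    ∀ (acc : Int × Int × Int × Int × Int × Int),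
    l.foldl (fun I pr => List.zipWith (List.zipWith (· + ·)) I (tensor_inercia pr.1 pr.2))
        (mat6 acc.1 acc.2.1 acc.2.2.1 acc.2.2.2.1 acc.2.2.2.2.1 acc.2.2.2.2.2)
      = (fun s : Int × Int × Int × Int × Int × Int =>
          mat6 s.1 s.2.1 s.2.2.1 s.2.2.2.1 s.2.2.2.2.1 s.2.2.2.2.2) (l.foldl stepB acc) := by
  intro l
  induction l with
  | nil => intro _ acc; rfl
  | cons pr t ih =>
    intro hl acc
    obtain ⟨ma, row⟩ := pr
    have hrow : row.length = 3 := hl (ma, row) (by simp)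
    match row, hrow with
    | [r1, r2, r3], _ =>
      simp only [List.foldl_cons]
      have hstep : List.zipWith (List.zipWith (· + ·))
          (mat6 acc.1 acc.2.1 acc.2.2.1 acc.2.2.2.1 acc.2.2.2.2.1 acc.2.2.2.2.2)
          (tensor_inercia ma [r1, r2, r3])
          = (fun s : Int × Int × Int × Int × Int × Int =>
              mat6 s.1 s.2.1 s.2.2.1 s.2.2.2.1 s.2.2.2.2.1 s.2.2.2.2.2)
            (stepB acc (ma, [r1, r2, r3])) := by
        simp [mat6, tensor_inercia, stepB]
      rw [hstep]
      exact ih (fun p hp => hl p (by simp [hp])) _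

lemma mem_zip_snd_take {α β : Type} : ∀ (m : List α) (R : List β) (p : α × β),
    p ∈ m.zip R → p.2 ∈ R.take m.length := by
  intro m
  induction m with
  | nil => intro R p h; simp [List.zip] at h
  | cons a t ih =>
    intro R p h
    cases R with
    | nil => simp [List.zip] at h
    | cons b s =>
      simp only [List.zip_cons_cons, List.mem_cons] at h
      rcases h with h | h
      · subst h; simp
      · simpa using Or.inr (ih s p h)

-- B's moment loop with an arbitrary starting accumulator
def Cf (l : List (Int × List Int)) (i j : Int) (s : Int) : Int :=
  l.foldl (fun s pr => s + pr.1 * PySem.List.pyGetD pr.2 i 0 * PySem.List.pyGetD pr.2 j 0) s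

lemma Cf_shift : ∀ (l : List (Int × List Int)) (i j s : Int), Cf l i j s = s + Cf l i j 0 := by
  intro l
  induction l with
  | nil => intro i j s; simp [Cf]
  | cons pr t ih =>
    intro i j s
    simp only [Cf, List.foldl_cons] at *
    rw [ih i j, ih i j (0 + _)]
    ring

lemma Cf_symm : ∀ (l : List (Int × List Int)) (i j s : Int), Cf l i j s = Cf l j i s := by
  intro l
  induction l with
  | nil => intro i j s; rfl
  | cons pr t ih =>
    intro i j s
    simp only [Cf, List.foldl_cons] at *
    rw [show s + pr.1 * PySem.List.pyGetD pr.2 i 0 * PySem.List.pyGetD pr.2 j 0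
          = s + pr.1 * PySem.List.pyGetD pr.2 j 0 * PySem.List.pyGetD pr.2 i 0 by ring]
    exact ih i j _

-- the six scalars of stepB, written with B's second moments
lemma fold_rel : ∀ (l : List (Int × List Int)), (∀ pr ∈ l, pr.2.length = 3) →
    ∀ (acc : Int × Int × Int × Int × Int × Int),
    l.foldl stepB acc
      = (acc.1 - (Cf l 1 1 0 + Cf l 2 2 0), acc.2.1 - (Cf l 0 0 0 + Cf l 2 2 0),
         acc.2.2.1 - (Cf l 0 0 0 + Cf l 1 1 0), acc.2.2.2.1 + Cf l 0 1 0,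
         acc.2.2.2.2.1 + Cf l 0 2 0, acc.2.2.2.2.2 + Cf l 1 2 0) := by
  intro l
  induction l with
  | nil => intro _ acc; simp [Cf]
  | cons pr t ih =>
    intro hl acc
    obtain ⟨ma, row⟩ := pr
    have hrow : row.length = 3 := hl (ma, row) (by simp)
    match row, hrow with
    | [r1, r2, r3], _ =>
      simp only [List.foldl_cons]
      rw [ih (fun p hp => hl p (by simp [hp]))]
      have hc : ∀ i j : Int, Cf ((ma, [r1, r2, r3]) :: t) i j 0
          = (0 + ma * PySem.List.pyGetD [r1, r2, r3] i 0 * PySem.List.pyGetD [r1, r2, r3] j 0)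
            + Cf t i j 0 := by
        intro i j; simp only [Cf, List.foldl_cons]; exact Cf_shift t i j _
      simp only [hc, stepB, Prod.mk.injEq]
      simp [pysem]
      refine ⟨by ring, by ring, by ring, by ring, by ring, by ring⟩

-- B's let-matrix, written out (zeta/range/indexing reduced)
set_option maxHeartbeats 1000000 in
lemma alt_eq (m : List Int) (R : List (List Int)) : tensor_inercia_geral_alt m R =
  [[moment m R 0 0 - (moment m R 0 0 + moment m R 1 1 + moment m R 2 2), moment m R 0 1, moment m R 0 2],
   [moment m R 1 0, moment m R 1 1 - (moment m R 0 0 + moment m R 1 1 + moment m R 2 2), moment m R 1 2],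
   [moment m R 2 0, moment m R 2 1, moment m R 2 2 - (moment m R 0 0 + moment m R 1 1 + moment m R 2 2)]] := by
  have hR3 : PySem.List.pyRange 0 3 1 = [0, 1, 2] := by decide
  simp [tensor_inercia_geral_alt, hR3, pysem]

lemma moment_eq_Cf (m : List Int) (R : List (List Int)) (i j : Int) :
    moment m R i j = Cf (m.zip R) i j 0 := rfl

-- ===== VERDICT (by name: the statement is the Claim_ definition above) =====
theorem tensor_inercia_geral_spec : Claim_equal_tensor_inercia_geral := by
  intro m R _ hPre
  obtain ⟨hlen, hrows⟩ := hPre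
  unfold Spec_tensor_inercia_geral tensor_inercia_geral
  have hinit : ((PySem.List.pyRange 0 3 1).map
      (fun _ => (PySem.List.pyRange 0 3 1).map (fun _ => (0 : Int))))
      = mat6 0 0 0 0 0 0 := by decide
  rw [hinit]
  have h0 : (PySem.List.pyRange ((0 : Nat) : Int) (PySem.List.len m) 1).foldl (stepA m R)
      (mat6 0 0 0 0 0 0)
      = ((m.drop 0).zip (R.drop 0)).foldl
          (fun I pr => List.zipWith (List.zipWith (· + ·)) I (tensor_inercia pr.1 pr.2))
          (mat6 0 0 0 0 0 0) :=
    foldA_drop (m.length - 0) 0 m R _ rfl (by omega) hlen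
  simp only [List.drop_zero, Int.natCast_zero] at h0
  rw [h0]
  have hzl : ∀ pr ∈ m.zip R, (pr : Int × List Int).2.length = 3 :=
    fun pr hpr => hrows pr.2 (mem_zip_snd_take m R pr hpr)
  have hz := zip_fold_eq (m.zip R) hzl (0, 0, 0, 0, 0, 0)
  rw [fold_rel (m.zip R) hzl (0, 0, 0, 0, 0, 0)] at hz
  dsimp only at hz
  rw [hz, alt_eq]
  simp only [moment_eq_Cf]
  rw [Cf_symm (m.zip R) 1 0 0, Cf_symm (m.zip R) 2 0 0, Cf_symm (m.zip R) 2 1 0]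
  simp only [mat6, List.cons.injEq, and_true]
  and_intros <;> ring
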